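-- pv_equiv track=rewrite | github.com/JanLopata/AoC_2019_python | day13.py | find_symmetry
-- ===== SOURCE A (Python) =====
-- def check_symmetry(data, start):
--     idx = 0
--     first = start - idx - 1
--     second = start + idx
--     while second < len(data) and first >= 0:
--         if data[first] != data[second]:
--             return False
--         idx += 1
--         first = start - idx - 1
--         second = start + idx
--
--     return True
--
-- def find_symmetry(data):
--     prev = -1
--     for i in range(len(data)):
--         if data[i] == prev:
--             if check_symmetry(data, i):
--                 return i
--         prev = data[i]
--     return 0
-- ===== SOURCE B (Python) =====
-- def find_symmetry(data):
--     n = len(data)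
--     for i in range(1, n):
--         if data[i] == data[i - 1]:
--             k = min(i, n - i)
--             if data[i - k:i] == data[i:i + k][::-1]:
--                 return i
--     return 0
-- ===== Notes on version B (the rewrite author's own statement) =====
-- stated objective: simpler
-- what changed: Replaced A's sentinel-initialized loop (prev=-1) plus a two-pointer while-loop helper by a direct adjacent-pair scan over range(1,n) whose boundary-palindrome test is a single slice/reverse comparison; this also removes the sentinel artefact at index 0.
-- intended difference: On inputs whose first element is -1 and that contain a genuine symmetry center, A's prev=-1 sentinel makes i=0 look like a match and A returns 0, while B returns the index of the first real center, which is the intended value. — e.g. on find_symmetry([-1, 1, 1]): A returns 0, B returns 2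
import Mathlib
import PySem

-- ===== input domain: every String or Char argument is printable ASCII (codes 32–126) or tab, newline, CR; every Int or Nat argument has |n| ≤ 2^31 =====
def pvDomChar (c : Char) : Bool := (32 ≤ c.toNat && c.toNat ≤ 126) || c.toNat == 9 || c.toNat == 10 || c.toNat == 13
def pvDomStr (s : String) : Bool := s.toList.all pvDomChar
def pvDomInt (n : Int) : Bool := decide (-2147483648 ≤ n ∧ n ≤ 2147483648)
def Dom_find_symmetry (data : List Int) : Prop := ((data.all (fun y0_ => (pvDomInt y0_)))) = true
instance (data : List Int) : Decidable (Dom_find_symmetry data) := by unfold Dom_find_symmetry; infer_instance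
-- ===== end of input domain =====

-- B replaces A's sentinel-driven loop and two-pointer helper by an adjacent-pair scan with a
-- slice/reverse palindrome comparison (objective: simpler); on inputs starting with -1 that
-- contain a real center, A's sentinel returns 0 while B returns that center (see D_ below).

-- ===== PORT A =====
-- while-loop of check_symmetry; fuel = data.length + 1 bounds the iteration count (loop runs
-- at most min(start, len-start) times), so the fuel-out branch is never reached on real runs
def checkSymAux (data : List Int) (start : Int) (idx : Nat) (fuel : Nat) : Bool :=
  match fuel with
  | 0 => true
  | fuel + 1 =>
    let first := start - (idx : Int) - 1
    let second := start + (idx : Int)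
    if second < (data.length : Int) ∧ 0 ≤ first then
      if PySem.List.pyGet? data first ≠ PySem.List.pyGet? data second then false
      else checkSymAux data start (idx + 1) fuel
    else true

def check_symmetry (data : List Int) (start : Int) : Bool :=
  checkSymAux data start 0 (data.length + 1)

def findSymAux (data : List Int) (prev : Int) (i : Nat) : Nat → Int
  | 0 => 0
  | fuel + 1 =>
    if h : i < data.length then
      if data[i] = prev then
        if check_symmetry data (i : Int) then (i : Int)
        else findSymAux data data[i] (i + 1) fuel
      else findSymAux data data[i] (i + 1) fuel
    else 0

def find_symmetry (data : List Int) : Int := findSymAux data (-1) 0 (data.length + 1)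

-- ===== PORT B =====
-- data[i-k:i] == data[i:i+k][::-1]
def palEdge (data : List Int) (i : Nat) : Bool :=
  let n := data.length
  let k := min i (n - i)
  PySem.List.slice data (some ((i : Int) - (k : Int))) (some (i : Int)) =
    (PySem.List.slice data (some (i : Int)) (some ((i : Int) + (k : Int)))).reverse

def altAux (data : List Int) (i : Nat) : Nat → Int
  | 0 => 0
  | fuel + 1 =>
    if _h : i < data.length then
      if data[i]? = data[i - 1]? then
        if palEdge data i then (i : Int) else altAux data (i + 1) fuel
      else altAux data (i + 1) fuel
    else 0

def find_symmetry_alt (data : List Int) : Int := altAux data 1 data.length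

-- ===== PRECONDITION & SPEC =====
-- On inputs whose first element is -1 and that contain a genuine symmetry center, A's
-- 'prev = -1' sentinel makes i = 0 look like a match and A returns 0, while B returns the
-- index of the first real center, which is the intended value.
def D_find_symmetry (data : List Int) : Prop :=
  data.head? = some (-1) ∧ ∃ i ∈ List.range data.length, 1 ≤ i ∧ data[i]? = data[i - 1]? ∧
    ∀ j ∈ List.range (min i (data.length - i)), data[i - 1 - j]? = data[i + j]?
instance (data : List Int) : Decidable (D_find_symmetry data) := by
  unfold D_find_symmetry; infer_instance

def Spec_find_symmetry (data : List Int) (out : Int) : Prop :=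
  ¬ D_find_symmetry data → out = find_symmetry_alt data
instance (data : List Int) (out : Int) : Decidable (Spec_find_symmetry data out) := by
  unfold Spec_find_symmetry; infer_instance

def pvDiffWitness_find_symmetry : List Int := [-1, 1, 1]
def pvDiffWitnessOut_find_symmetry : Int × Int := (0, 2)

-- ===== CLAIM (what is proved, stated in full; the proofs are below) =====
def Claim_unchanged_find_symmetry : Prop := ∀ (data : List Int), Dom_find_symmetry data → Spec_find_symmetry data (find_symmetry data)
def Claim_changed_find_symmetry : Prop := Dom_find_symmetry (pvDiffWitness_find_symmetry) ∧ D_find_symmetry (pvDiffWitness_find_symmetry) ∧ find_symmetry (pvDiffWitness_find_symmetry) = pvDiffWitnessOut_find_symmetry.1 ∧ find_symmetry_alt (pvDiffWitness_find_symmetry) = pvDiffWitnessOut_find_symmetry.2 ∧ pvDiffWitnessOut_find_symmetry.1 ≠ pvDiffWitnessOut_find_symmetry.2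
def Claim_exact_find_symmetry : Prop := ∀ (data : List Int), Dom_find_symmetry data → D_find_symmetry data → find_symmetry data ≠ find_symmetry_alt data

-- ===== LEMMAS AND PROOFS =====

-- A's inner while-loop tests exactly the mirror pairs (i-1-j, i+j) for j < min i (n-i)
theorem checkSymAux_iff (data : List Int) (i : Nat) :
    ∀ fuel idx, min i (data.length - i) - idx < fuel →
      (checkSymAux data (i : Int) idx fuel = true ↔
        ∀ j, idx ≤ j → j < min i (data.length - i) → data[i - 1 - j]? = data[i + j]?) := by
  intro fuel
  induction fuel with
  | zero => intro idx h; omega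
  | succ fuel ih =>
    intro idx h
    by_cases hc : (i : Int) + (idx : Int) < (data.length : Int) ∧ 0 ≤ (i : Int) - (idx : Int) - 1
    · have hidxk : idx < min i (data.length - i) := by omega
      have h1 : (i : Int) - (idx : Int) - 1 = ((i - 1 - idx : Nat) : Int) := by omega
      have h2 : (i : Int) + (idx : Int) = ((i + idx : Nat) : Int) := by omega
      by_cases he : data[i - 1 - idx]? = data[i + idx]?
      · rw [show checkSymAux data (i : Int) idx (fuel + 1) = checkSymAux data (i : Int) (idx + 1) fuel by
          simp only [checkSymAux]
          rw [if_pos hc, h1, h2, PySem.List.pyGet?_natCast, PySem.List.pyGet?_natCast,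
            if_neg (by simpa using he)]]
        rw [ih (idx + 1) (by omega)]
        constructor
        · intro hall j hj1 hj2
          rcases Nat.eq_or_lt_of_le hj1 with hj | hj
          · exact hj ▸ he
          · exact hall j hj hj2
        · intro hall j hj1 hj2
          exact hall j (by omega) hj2
      · rw [show checkSymAux data (i : Int) idx (fuel + 1) = false by
          simp only [checkSymAux]
          rw [if_pos hc, h1, h2, PySem.List.pyGet?_natCast, PySem.List.pyGet?_natCast,
            if_pos he]]
        simp only [Bool.false_eq_true, false_iff]
        intro hall
        exact he (hall idx le_rfl hidxk)
    · rw [show checkSymAux data (i : Int) idx (fuel + 1) = true by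
        simp only [checkSymAux]; rw [if_neg hc]]
      simp only [true_iff]
      intro j hj1 hj2
      omega

theorem check_symmetry_iff (data : List Int) (i : Nat) :
    check_symmetry data (i : Int) = true ↔
      ∀ j, j < min i (data.length - i) → data[i - 1 - j]? = data[i + j]? := by
  rw [show check_symmetry data (i : Int) = checkSymAux data (i : Int) 0 (data.length + 1) from rfl, checkSymAux_iff data i (data.length + 1) 0 (by omega)]
  constructor
  · intro hall j hj; exact hall j (Nat.zero_le j) hj
  · intro hall j _ hj; exact hall j hj

-- B's slice/reverse comparison tests the same mirror pairs
theorem palEdge_iff (data : List Int) (i : Nat) (hi : i ≤ data.length) :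
    palEdge data i = true ↔
      ∀ j, j < min i (data.length - i) → data[i - 1 - j]? = data[i + j]? := by
  have hk1 : min i (data.length - i) ≤ i := Nat.min_le_left _ _
  have hk2 : min i (data.length - i) ≤ data.length - i := Nat.min_le_right _ _
  set k := min i (data.length - i) with hkdef
  have e1 : (i : Int) - (k : Int) = ((i - k : Nat) : Int) := by omega
  have e2 : (i : Int) + (k : Int) = ((i + k : Nat) : Int) := by omega
  have hsl : palEdge data i = true ↔
      (data.drop (i - k)).take k = ((data.drop i).take k).reverse := by
    rw [palEdge]
    simp only [← hkdef, e1, e2]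
    rw [PySem.List.slice_natCast, PySem.List.slice_natCast]
    rw [show i - (i - k) = k by omega, show i + k - i = k by omega]
    simp
  rw [hsl]
  have hgetL : ∀ j, j < k → ((data.drop (i - k)).take k)[j]? = data[i - k + j]? := by
    intro j hj
    rw [List.getElem?_take_of_lt hj, List.getElem?_drop]
  have hgetR : ∀ j, j < k → (((data.drop i).take k).reverse)[j]? = data[i + (k - 1 - j)]? := by
    intro j hj
    have hjl : j < ((data.drop i).take k).length := by simp; omega
    rw [List.getElem?_reverse hjl]
    have h2 : ((data.drop i).take k).length - 1 - j = k - 1 - j := by simp; omega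
    rw [h2, List.getElem?_take_of_lt (by omega), List.getElem?_drop]
  constructor
  · intro heq j hj
    have hj2 := congrArg (fun l => l[k - 1 - j]?) heq
    simp only at hj2
    rw [hgetL _ (by omega), hgetR _ (by omega)] at hj2
    rw [show i - k + (k - 1 - j) = i - 1 - j by omega,
        show k - 1 - (k - 1 - j) = j by omega] at hj2
    exact hj2
  · intro hall
    apply List.ext_getElem?
    intro j
    by_cases hj : j < k
    · rw [hgetL _ hj, hgetR _ hj]
      have h3 := hall (k - 1 - j) (by omega)
      rw [show i - 1 - (k - 1 - j) = i - k + j by omega] at h3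
      exact h3
    · rw [List.getElem?_eq_none (by simp; omega), List.getElem?_eq_none (by simp; omega)]

theorem loops_eq (data : List Int) :
    ∀ fa fb i p, data.length - i < fa → data.length - i ≤ fb → 1 ≤ i → data[i - 1]? = some p →
      findSymAux data p i fa = altAux data i fb := by
  intro fa
  induction fa with
  | zero => intro fb i p h1 _ _ _; omega
  | succ fa ih =>
    intro fb i p hfa hfb h1 hp
    by_cases hi : i < data.length
    · obtain ⟨fb', rfl⟩ : ∃ fb', fb = fb' + 1 := ⟨fb - 1, by omega⟩
      simp only [findSymAux, altAux, dif_pos hi]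
      have hpair : (data[i]? = data[i - 1]?) ↔ (data[i] = p) := by
        rw [hp, List.getElem?_eq_getElem hi, Option.some_inj]
      have hcp : check_symmetry data (i : Int) = palEdge data i := by
        rcases Bool.eq_false_or_eq_true (palEdge data i) with hb | hb <;> rw [hb]
        · rw [check_symmetry_iff]
          rw [palEdge_iff data i (le_of_lt hi)] at hb
          exact hb
        · rw [← Bool.not_eq_true, check_symmetry_iff]
          rw [← Bool.not_eq_true, palEdge_iff data i (le_of_lt hi)] at hb
          exact hb
      have hrec : findSymAux data data[i] (i + 1) fa = altAux data (i + 1) fb' :=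
        ih fb' (i + 1) data[i] (by omega) (by omega) (by omega)
          (by rw [show i + 1 - 1 = i by omega, List.getElem?_eq_getElem hi])
      by_cases hc : data[i] = p
      · rw [if_pos hc, if_pos (hpair.mpr hc), hcp]
        by_cases hpe : palEdge data i = true
        · rw [if_pos hpe, if_pos hpe]
        · rw [if_neg hpe, if_neg hpe, hrec]
      · rw [if_neg hc, if_neg (fun h => hc (hpair.mp h)), hrec]
    · cases fb <;> simp only [findSymAux, altAux, dif_neg hi]

theorem findSymAux_succ (data : List Int) (p : Int) (i fuel : Nat) :
    findSymAux data p i (fuel + 1) =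
      if h : i < data.length then
        if data[i] = p then
          if check_symmetry data (i : Int) then (i : Int)
          else findSymAux data data[i] (i + 1) fuel
        else findSymAux data data[i] (i + 1) fuel
      else 0 := rfl

-- spec-level predicate: i is a center (adjacent pair equal, even palindrome reaches a boundary)
def Good (data : List Int) (i : Nat) : Prop :=
  1 ≤ i ∧ i < data.length ∧ data[i]? = data[i - 1]? ∧
    ∀ j, j < min i (data.length - i) → data[i - 1 - j]? = data[i + j]?

theorem D_iff (data : List Int) :
    D_find_symmetry data ↔ data.head? = some (-1) ∧ ∃ i, Good data i := by
  simp only [D_find_symmetry, Good, List.mem_range]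
  constructor
  · rintro ⟨hh, i, h1, h2, h3, h4⟩
    exact ⟨hh, i, h2, h1, h3, fun j hj => h4 j (by simpa [List.mem_range] using hj)⟩
  · rintro ⟨hh, i, h2, h1, h3, h4⟩
    exact ⟨hh, i, h1, h2, h3, fun j hj => h4 j (by simpa [List.mem_range] using hj)⟩

theorem altAux_eq_zero (data : List Int) :
    ∀ fb i, 1 ≤ i → (∀ j, ¬ Good data j) → altAux data i fb = 0 := by
  intro fb
  induction fb with
  | zero => intro i _ _; rfl
  | succ fb ih =>
    intro i h1 h
    by_cases hi : i < data.length
    · simp only [altAux, dif_pos hi]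
      have hng := h i
      rw [Good] at hng
      by_cases hc : data[i]? = data[i - 1]?
      · rw [if_pos hc]
        have hpe : ¬ palEdge data i = true := by
          rw [palEdge_iff data i (le_of_lt hi)]
          intro hall
          exact hng ⟨h1, hi, hc, hall⟩
        rw [if_neg hpe]
        exact ih (i + 1) (by omega) h
      · rw [if_neg hc]
        exact ih (i + 1) (by omega) h
    · simp only [altAux, dif_neg hi]

theorem altAux_pos (data : List Int) :
    ∀ fb i, data.length - i ≤ fb → 1 ≤ i →
      (∃ j, i ≤ j ∧ Good data j) → 1 ≤ altAux data i fb := by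
  intro fb
  induction fb with
  | zero =>
    intro i hfb h1 ⟨j, hj, hgj⟩
    have := hgj.2.1
    omega
  | succ fb ih =>
    intro i hfb h1 ⟨j, hj, hgj⟩
    have ⟨hj1, hjn, hjpair, hjall⟩ := hgj
    have hi : i < data.length := by omega
    simp only [altAux, dif_pos hi]
    by_cases hc : data[i]? = data[i - 1]?
    · rw [if_pos hc]
      by_cases hpe : palEdge data i = true
      · rw [if_pos hpe]; exact_mod_cast h1
      · rw [if_neg hpe]
        have hji : j ≠ i := by
          intro hji
          subst hji
          exact hpe ((palEdge_iff data j (le_of_lt hjn)).mpr hjall)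
        exact ih (i + 1) (by omega) (by omega) ⟨j, by omega, hgj⟩
    · rw [if_neg hc]
      have hji : j ≠ i := by
        intro hji; subst hji; exact hc hjpair
      exact ih (i + 1) (by omega) (by omega) ⟨j, by omega, hgj⟩

-- ===== VERDICT (by name: the statement is the Claim_ definition above) =====
theorem find_symmetry_spec : Claim_unchanged_find_symmetry := by
  intro data _ hND
  match data with
  | [] => rfl
  | x :: tl =>
    have h0 : (0 : Nat) < (x :: tl).length := by simp
    rw [show find_symmetry (x :: tl) = findSymAux (x :: tl) (-1) 0 ((x :: tl).length + 1) from rfl,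
        findSymAux_succ, dif_pos h0]
    simp only [List.getElem_cons_zero]
    by_cases hx : x = -1
    · have hchk : check_symmetry (x :: tl) ((0 : Nat) : Int) = true := by
        rw [check_symmetry_iff]; intro j hj; omega
      rw [if_pos hx, if_pos hchk]
      have hzero : find_symmetry_alt (x :: tl) = 0 := by
        rw [show find_symmetry_alt (x :: tl) = altAux (x :: tl) 1 (x :: tl).length from rfl]
        apply altAux_eq_zero (x :: tl) _ 1 le_rfl
        intro j hGj
        exact hND ((D_iff (x :: tl)).mpr ⟨by simp [hx], j, hGj⟩)
      rw [hzero]; rfl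
    · rw [if_neg hx]
      have hrec : findSymAux (x :: tl) x 1 (x :: tl).length = altAux (x :: tl) 1 (x :: tl).length := by
        apply loops_eq (x :: tl) (x :: tl).length (x :: tl).length 1 x (by simp) (by omega) le_rfl
        simp
      exact hrec

theorem find_symmetry_changed : Claim_changed_find_symmetry := by
  unfold Claim_changed_find_symmetry; decide

theorem find_symmetry_tight : Claim_exact_find_symmetry := by
  intro data _ hD
  obtain ⟨hhead, j, hgj⟩ := (D_iff data).mp hD
  match data with
  | [] => simp at hhead
  | x :: tl =>
    have hx : x = -1 := by simpa using hhead
    have h0 : (0 : Nat) < (x :: tl).length := by simp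
    have hA : find_symmetry (x :: tl) = 0 := by
      rw [show find_symmetry (x :: tl) = findSymAux (x :: tl) (-1) 0 ((x :: tl).length + 1) from rfl,
          findSymAux_succ, dif_pos h0]
      simp only [List.getElem_cons_zero]
      have hchk : check_symmetry (x :: tl) ((0 : Nat) : Int) = true := by
        rw [check_symmetry_iff]; intro j hj; omega
      rw [if_pos hx, if_pos hchk]; rfl
    have hB : 1 ≤ find_symmetry_alt (x :: tl) := by
      rw [show find_symmetry_alt (x :: tl) = altAux (x :: tl) 1 (x :: tl).length from rfl]
      apply altAux_pos (x :: tl) (x :: tl).length 1 (by omega) le_rfl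
      exact ⟨j, hgj.1, hgj⟩
    rw [hA]
    omega
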